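-- pv_equiv track=rewrite | github.com/botantantan/tugas1-kripto | vigenere_autokey.py | process_key_vigenere
-- ===== SOURCE A (Python) =====
-- def process_key_vigenere(key, plaintext):
--     expanded_key = key
--     string_length = len(plaintext)
--     expanded_key_length = len(expanded_key)
--
--     while expanded_key_length < string_length:
--         expanded_key = expanded_key + plaintext
--         expanded_key_length = len(expanded_key)
--
--     expanded_key = expanded_key[0:string_length]
--     return(expanded_key)
-- ===== SOURCE B (Python) =====
-- def process_key_vigenere(key, plaintext):
--     # Build the expanded key per index: position i takes key[i] while the key
--     # lasts, then wraps into the plaintext itself (autokey), no concatenation.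
--     nk = len(key)
--     return ''.join(key[i] if i < nk else plaintext[i - nk]
--                    for i in range(len(plaintext)))
-- ===== Notes on version B (the rewrite author's own statement) =====
-- stated objective: alternative
-- what changed: Replaces A's append-whole-plaintext-and-remeasure while-loop plus final slice by a per-index construction: each output position i is selected directly as key[i] or plaintext[i-len(key)] and joined, with no concatenation, slicing or length re-measuring.
import Mathlib
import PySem

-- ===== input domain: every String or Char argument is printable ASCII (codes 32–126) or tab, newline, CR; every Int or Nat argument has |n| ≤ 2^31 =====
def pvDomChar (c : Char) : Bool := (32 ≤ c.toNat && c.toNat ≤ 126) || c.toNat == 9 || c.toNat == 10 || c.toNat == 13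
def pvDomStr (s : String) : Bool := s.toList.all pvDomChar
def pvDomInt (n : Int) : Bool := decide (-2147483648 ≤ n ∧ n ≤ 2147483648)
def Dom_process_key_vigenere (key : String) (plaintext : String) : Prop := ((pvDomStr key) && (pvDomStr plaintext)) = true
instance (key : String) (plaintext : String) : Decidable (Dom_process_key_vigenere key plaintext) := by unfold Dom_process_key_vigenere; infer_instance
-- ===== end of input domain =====

-- B builds the expanded key per index (key[i] while the key lasts, then plaintext[i-len(key)]) instead of A's append-and-remeasure loop plus slice (alternative decomposition).


-- ===== PORT A =====
-- while expanded_key_length < string_length: expanded_key = expanded_key + plaintext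
def pvLoopA (plaintext : List Char) (expanded_key : List Char) : List Char :=
  if expanded_key.length < plaintext.length then
    pvLoopA plaintext (expanded_key ++ plaintext)
  else expanded_key
termination_by plaintext.length - expanded_key.length
decreasing_by simp only [List.length_append]; omega

def process_key_vigenere (key : String) (plaintext : String) : String :=
  let string_length := plaintext.toList.length
  let expanded_key := pvLoopA plaintext.toList key.toList
  String.mk (PySem.List.slice expanded_key (some 0) (some (string_length : Int)))

-- ===== PORT B =====
-- ''.join(key[i] if i < nk else plaintext[i - nk] for i in range(len(plaintext)))
-- (both indexings are in range by construction; getD transcribes them exactly there)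
def process_key_vigenere_alt (key : String) (plaintext : String) : String :=
  let kl := key.toList
  let pl := plaintext.toList
  let nk := kl.length
  String.mk ((List.range pl.length).map (fun i =>
    if i < nk then kl.getD i ' ' else pl.getD (i - nk) ' '))

-- ===== PRECONDITION & SPEC =====
def Spec_process_key_vigenere (key : String) (plaintext : String) (out : String) : Prop := out = process_key_vigenere_alt key plaintext
instance (key : String) (plaintext : String) (out : String) : Decidable (Spec_process_key_vigenere key plaintext out) := by unfold Spec_process_key_vigenere; infer_instance

-- ===== CLAIM (what is proved, stated in full; the proofs are below) =====
def Claim_equal_process_key_vigenere : Prop := ∀ (key : String) (plaintext : String), Dom_process_key_vigenere key plaintext → Spec_process_key_vigenere key plaintext (process_key_vigenere key plaintext)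

-- ===== LEMMAS AND PROOFS =====
lemma pvLoopA_take (pt ek : List Char) :
    (pvLoopA pt ek).take pt.length = (ek ++ pt).take pt.length := by
  rw [pvLoopA]
  split_ifs with h
  · rw [pvLoopA]
    split_ifs with h2
    · simp only [List.length_append] at h2; omega
    · rfl
  · rw [List.take_append_of_le_length (by omega)]

lemma take_eq_range_map (kl pl : List Char) :
    (kl ++ pl).take pl.length =
      (List.range pl.length).map (fun i =>
        if i < kl.length then kl.getD i ' ' else pl.getD (i - kl.length) ' ') := by
  apply List.ext_getElem
  · simp only [List.length_take, List.length_append, List.length_map, List.length_range]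
    omega
  · intro i h1 h2
    simp only [List.length_take, List.length_append] at h1
    simp only [List.getElem_take, List.getElem_map, List.getElem_range]
    rw [List.getElem_append]
    split_ifs with hi
    · rw [List.getD_eq_getElem _ _ hi]
    · rw [List.getD_eq_getElem _ _ (by omega)]

-- ===== VERDICT (by name: the statement is the Claim_ definition above) =====
theorem process_key_vigenere_spec : Claim_equal_process_key_vigenere := by
  intro key plaintext _
  unfold Spec_process_key_vigenere process_key_vigenere process_key_vigenere_alt
  simp only [PySem.List.slice_zero_start, PySem.List.slice_to_natCast]
  rw [pvLoopA_take, take_eq_range_map]
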